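-- pv_equiv track=rewrite | github.com/shaversj/100-days-of-code-r2 | days/34/jolly-py/solution.py | jolly_jumpers
-- ===== SOURCE A (Python) =====
-- def jolly_jumpers(numbers):
--     diffs = []
--     jolly_list = [jolly for jolly in range(1, len(numbers))]
--     for idx in range(0, len(numbers) - 1):
--         diffs.append(abs(numbers[idx] - numbers[idx + 1]))
--
--     if sorted(diffs) != jolly_list:
--         return False
--
--     return True
-- ===== SOURCE B (Python) =====
-- def jolly_jumpers(numbers):
--     n = len(numbers)
--     seen = [False] * (n - 1)
--     for a, b in zip(numbers, numbers[1:]):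
--         d = abs(a - b)
--         if d < 1 or d > n - 1 or seen[d - 1]:
--             return False
--         seen[d - 1] = True
--     return True
-- ===== Notes on version B (the rewrite author's own statement) =====
-- stated objective: faster
-- what changed: Instead of building the list of absolute differences, sorting it and comparing with list(range(1,n)), B does one pass over consecutive pairs marking each difference in a boolean array and returns False immediately on an out-of-range or duplicate difference.
import Mathlib
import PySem

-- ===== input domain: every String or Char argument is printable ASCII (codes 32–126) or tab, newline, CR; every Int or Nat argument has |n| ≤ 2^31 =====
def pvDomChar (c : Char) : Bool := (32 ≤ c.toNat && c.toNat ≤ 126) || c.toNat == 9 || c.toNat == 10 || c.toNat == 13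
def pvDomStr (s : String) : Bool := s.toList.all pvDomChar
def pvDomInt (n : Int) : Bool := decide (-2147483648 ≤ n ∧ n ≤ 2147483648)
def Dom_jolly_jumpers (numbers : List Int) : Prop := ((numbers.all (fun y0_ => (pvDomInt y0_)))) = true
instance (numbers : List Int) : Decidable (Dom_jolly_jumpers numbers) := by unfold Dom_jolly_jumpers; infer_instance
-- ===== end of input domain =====

-- B replaces A's build-then-sort-then-compare with a single pass marking each difference
-- in a boolean array and rejecting duplicates/out-of-range on the spot (one-pass algorithm, no sort).

-- ===== PORT A =====
-- literal transliteration: diffs built by appending in a loop over range(0, len-1),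
-- then sorted(diffs) compared against list(range(1, len)).
def jolly_jumpers (numbers : List Int) : Bool :=
  let jolly_list := PySem.List.pyRange 1 (numbers.length : Int) 1
  let diffs := (PySem.List.pyRange 0 ((numbers.length : Int) - 1) 1).foldl
    (fun acc idx =>
      acc ++ [|PySem.List.pyGetD numbers idx 0 - PySem.List.pyGetD numbers (idx + 1) 0|]) []
  if PySem.List.sorted diffs (fun x => x) false ≠ jolly_list then false else true

-- ===== PORT B =====
-- the loop of Source B: early return ⇒ structural recursion over zip(numbers, numbers[1:])
def jollyAltLoop (nm1 : Int) (seen : List Bool) : List (Int × Int) → Bool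
  | [] => true
  | (a, b) :: rest =>
    let d := |a - b|
    if d < 1 ∨ nm1 < d ∨ seen.getD (d - 1).toNat false then false
    else jollyAltLoop nm1 (seen.set (d - 1).toNat true) rest

def jolly_jumpers_alt (numbers : List Int) : Bool :=
  let n := (numbers.length : Int)
  jollyAltLoop (n - 1) (List.replicate (n - 1).toNat false) (numbers.zip numbers.tail)

-- ===== PRECONDITION & SPEC =====
def Spec_jolly_jumpers (numbers : List Int) (out : Bool) : Prop := out = jolly_jumpers_alt numbers
instance (numbers : List Int) (out : Bool) : Decidable (Spec_jolly_jumpers numbers out) := by unfold Spec_jolly_jumpers; infer_instance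

-- ===== CLAIM (what is proved, stated in full; the proofs are below) =====
def Claim_equal_jolly_jumpers : Prop := ∀ (numbers : List Int), Dom_jolly_jumpers numbers → Spec_jolly_jumpers numbers (jolly_jumpers numbers)

-- ===== LEMMAS AND PROOFS =====

lemma foldl_snoc {α β : Type} (f : α → β) :
    ∀ (l : List α) (acc : List β), l.foldl (fun a x => a ++ [f x]) acc = acc ++ l.map f
  | [], acc => by simp
  | x :: t, acc => by simp [List.foldl, foldl_snoc f t]

-- A's diffs list equals the map over consecutive pairs.
lemma diffs_eq (numbers : List Int) :
    (PySem.List.pyRange 0 ((numbers.length : Int) - 1) 1).foldl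
      (fun acc idx =>
        acc ++ [|PySem.List.pyGetD numbers idx 0 - PySem.List.pyGetD numbers (idx + 1) 0|]) []
    = (numbers.zip numbers.tail).map (fun p => |p.1 - p.2|) := by
  rw [PySem.List.pyRange_one, List.foldl_map, foldl_snoc]
  apply List.ext_getElem
  · simp only [List.nil_append, List.length_map, List.length_range, List.length_zip,
      List.length_tail]
    omega
  · intro i h1 h2
    have hi : i < numbers.length - 1 := by simp at h2; omega
    have hi1 : (0 : Int) ≤ (i : Int) := by positivity
    have hi2 : ((i : Nat) : Int) < (numbers.length : Int) := by
      omega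
    have hi3 : (0 : Int) ≤ (i : Int) + 1 := by positivity
    have hi4 : ((i : Nat) : Int) + 1 < (numbers.length : Int) := by
      omega
    simp only [List.nil_append, List.getElem_map, List.getElem_range, List.getElem_zip,
      List.getElem_tail]
    rw [show (0 : Int) + (i : Int) = (i : Int) by ring]
    rw [PySem.List.pyGetD_eq_getElem numbers 0 hi1 hi2]
    rw [show ((i : Nat) : Int) + 1 = (((i + 1 : Nat) : Int)) by push_cast; ring]
    rw [PySem.List.pyGetD_eq_getElem numbers 0 (by positivity) (by push_cast; omega)]
    simp

-- getD after set on a boolean list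
lemma getD_set_bool (seen : List Bool) (idx j : Nat) (hidx : idx < seen.length) :
    (seen.set idx true).getD j false = (if idx = j then true else seen.getD j false) := by
  by_cases h : idx = j
  · subst h
    simp [List.getD, hidx]
  · simp [List.getD, List.getElem?_set_of_lt' _ seen hidx, h]

-- the loop returns true iff all diffs are in range, unseen, and pairwise distinct
lemma loop_iff (nm1 : Int) :
    ∀ (ps : List (Int × Int)) (seen : List Bool), seen.length = nm1.toNat →
    (jollyAltLoop nm1 seen ps = true ↔
      ((∀ d ∈ ps.map (fun p => |p.1 - p.2|), 1 ≤ d ∧ d ≤ nm1 ∧ seen.getD (d - 1).toNat false = false)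
        ∧ (ps.map (fun p => |p.1 - p.2|)).Nodup))
  | [], seen, hlen => by simp [jollyAltLoop]
  | (a, b) :: rest, seen, hlen => by
    rw [jollyAltLoop]
    set d := |a - b| with hd
    by_cases hc : d < 1 ∨ nm1 < d ∨ seen.getD (d - 1).toNat false
    · rw [if_pos hc]
      apply iff_of_false (by simp)
      rintro ⟨h1, _⟩
      obtain ⟨hd1, hd2, hd3⟩ := h1 d (by simp [hd])
      rcases hc with h | h | h
      · omega
      · omega
      · rw [hd3] at h; exact Bool.false_ne_true h
    · rw [if_neg hc]
      push Not at hc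
      obtain ⟨hd1, hd2, hd3⟩ := hc
      have hd3' : seen.getD (d - 1).toNat false = false := by
        cases h : seen.getD (d - 1).toNat false
        · rfl
        · exact absurd h hd3
      have hidx : (d - 1).toNat < seen.length := by rw [hlen]; omega
      have hlen' : (seen.set (d - 1).toNat true).length = nm1.toNat := by
        simp [hlen]
      rw [loop_iff nm1 rest (seen.set (d - 1).toNat true) hlen']
      simp only [List.map_cons, List.forall_mem_cons, List.nodup_cons]
      constructor
      · rintro ⟨hall, hnd⟩
        refine ⟨⟨⟨hd1, hd2, hd3'⟩, ?_⟩, ⟨?_, hnd⟩⟩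
        · intro d' hd'
          obtain ⟨h1, h2, h3⟩ := hall d' hd'
          rw [getD_set_bool seen _ _ hidx] at h3
          refine ⟨h1, h2, ?_⟩
          by_cases he : (d - 1).toNat = (d' - 1).toNat
          · rw [if_pos he] at h3; exact absurd h3 (by simp)
          · rwa [if_neg he] at h3
        · intro hmem
          obtain ⟨h1, h2, h3⟩ := hall _ hmem
          rw [getD_set_bool seen _ _ hidx, if_pos rfl] at h3
          simp at h3
      · rintro ⟨⟨_, hall⟩, hnotmem, hnd⟩
        refine ⟨?_, hnd⟩
        intro d' hd'
        obtain ⟨h1, h2, h3⟩ := hall d' hd'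
        refine ⟨h1, h2, ?_⟩
        rw [getD_set_bool seen _ _ hidx]
        have hne : d ≠ d' := by
          rintro rfl
          exact hnotmem hd'
        rw [if_neg (by omega)]
        exact h3

lemma getD_replicate_false (m j : Nat) : (List.replicate m false).getD j false = false := by
  simp [List.getD, List.getElem?_replicate]
  split <;> rfl

-- the characterisation both ports reduce to, with n = numbers.length
lemma sorted_eq_range_iff (ds : List Int) (n : Int) (hlen : (ds.length : Int) = max (n - 1) 0) :
    (PySem.List.sorted ds (fun x => x) false = PySem.List.pyRange 1 n 1)
      ↔ ((∀ d ∈ ds, 1 ≤ d ∧ d ≤ n - 1) ∧ ds.Nodup) := by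
  set R := PySem.List.pyRange 1 n 1 with hR
  have hmemR : ∀ d : Int, d ∈ R ↔ 1 ≤ d ∧ d < n := fun d => PySem.List.mem_pyRange_one
  have hlenR : R.length = (n - 1).toNat := PySem.List.length_pyRange_one 1 n
  constructor
  · intro h
    have hperm : ds.Perm R := by
      have := PySem.List.sorted_perm ds (fun x => x) false
      rw [h] at this
      exact this.symm
    constructor
    · intro d hd
      have : d ∈ R := hperm.mem_iff.mp hd
      rw [hmemR] at this
      omega
    · exact (hperm.nodup_iff).mpr (PySem.List.nodup_pyRange_one 1 n)
  · rintro ⟨hrange, hnd⟩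
    have hsub : ds ⊆ R := by
      intro d hd
      rw [hmemR]
      have := hrange d hd
      omega
    have hsp : List.Subperm ds R := List.Nodup.subperm hnd hsub
    have hlengths : R.length ≤ ds.length := by omega
    have hperm : ds.Perm R := hsp.perm_of_length_le hlengths
    exact PySem.List.sorted_eq_of_perm_of_pairwise_lt ds R (fun x => x) hperm.symm
      (PySem.List.pairwise_lt_pyRange_one 1 n)

-- ===== VERDICT (by name: the statement is the Claim_ definition above) =====
theorem jolly_jumpers_spec : Claim_equal_jolly_jumpers := by
  intro numbers _
  unfold Spec_jolly_jumpers jolly_jumpers jolly_jumpers_alt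
  set n : Int := (numbers.length : Int) with hn
  set ds := (numbers.zip numbers.tail).map (fun p => |p.1 - p.2|) with hds
  have hdslen : (ds.length : Int) = max (n - 1) 0 := by
    simp only [hds, List.length_map, List.length_zip, List.length_tail]
    omega
  rw [diffs_eq]
  rw [Bool.eq_iff_iff]
  rw [loop_iff (n - 1) (numbers.zip numbers.tail) _ (by simp)]
  simp only [← hds]
  constructor
  · intro h
    have hsort : PySem.List.sorted ds (fun x => x) false = PySem.List.pyRange 1 n 1 := by
      by_contra hne
      rw [if_pos hne] at h
      exact Bool.false_ne_true h
    obtain ⟨hrange, hnd⟩ := (sorted_eq_range_iff ds n hdslen).mp hsort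
    refine ⟨?_, hnd⟩
    intro d hd
    obtain ⟨h1, h2⟩ := hrange d hd
    exact ⟨h1, h2, getD_replicate_false _ _⟩
  · rintro ⟨hall, hnd⟩
    have : PySem.List.sorted ds (fun x => x) false = PySem.List.pyRange 1 n 1 := by
      apply (sorted_eq_range_iff ds n hdslen).mpr
      exact ⟨fun d hd => ⟨(hall d hd).1, (hall d hd).2.1⟩, hnd⟩
    rw [if_neg (by simpa using this)]
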